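-- pv_equiv track=rewrite | github.com/gobbleyourdong/open_problems | math/p_vs_np/numerics/exponent_race.py | dpll_count
-- ===== SOURCE A (Python) =====
-- def dpll_count(n, clauses):
--     """DPLL with unit propagation. Count nodes explored."""
--     nodes = [0]
--     def propagate(assignment):
--         changed = True
--         while changed:
--             changed = False
--             for clause in clauses:
--                 unset = []; sat = False
--                 for lit in clause:
--                     v = abs(lit)-1
--                     if v in assignment:
--                         if (lit>0 and assignment[v]) or (lit<0 and not assignment[v]):
--                             sat = True; break
--                     else: unset.append(lit)
--                 if sat: continue
--                 if not unset: return False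
--                 if len(unset) == 1:
--                     assignment[abs(unset[0])-1] = unset[0] > 0
--                     changed = True
--         return True
--     def solve(assignment):
--         nodes[0] += 1
--         if not propagate(assignment): return None
--         unset = [i for i in range(n) if i not in assignment]
--         if not unset: return assignment
--         v = unset[0]
--         for val in [True, False]:
--             a = dict(assignment); a[v] = val
--             r = solve(a)
--             if r is not None: return r
--         return None
--     solve({})
--     return nodes[0]
-- ===== SOURCE B (Python) =====
-- def dpll_count(n, clauses):
--     """DPLL with unit propagation. Count nodes explored (explicit-stack DFS)."""
--     def propagate(assignment):
--         changed = True
--         while changed: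
--             changed = False
--             for clause in clauses:
--                 unset = []; sat = False
--                 for lit in clause:
--                     v = abs(lit)-1
--                     if v in assignment:
--                         if (lit>0 and assignment[v]) or (lit<0 and not assignment[v]):
--                             sat = True; break
--                     else: unset.append(lit)
--                 if sat: continue
--                 if not unset: return False
--                 if len(unset) == 1:
--                     assignment[abs(unset[0])-1] = unset[0] > 0
--                     changed = True
--         return True
--     nodes = 0
--     stack = [{}]
--     while stack:
--         assignment = stack.pop()
--         nodes += 1
--         if not propagate(assignment):
--             continue
--         unset = [i for i in range(n) if i not in assignment]
--         if not unset:
--             break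
--         v = unset[0]
--         a_false = dict(assignment); a_false[v] = False
--         a_true = dict(assignment); a_true[v] = True
--         stack.append(a_false)
--         stack.append(a_true)
--     return nodes
-- ===== Notes on version B (the rewrite author's own statement) =====
-- stated objective: alternative
-- what changed: The recursive solve is replaced by an iterative DFS over an explicit stack of partial assignments (push False then True, break at the first satisfying assignment); propagate is kept as-is.
import Mathlib
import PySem

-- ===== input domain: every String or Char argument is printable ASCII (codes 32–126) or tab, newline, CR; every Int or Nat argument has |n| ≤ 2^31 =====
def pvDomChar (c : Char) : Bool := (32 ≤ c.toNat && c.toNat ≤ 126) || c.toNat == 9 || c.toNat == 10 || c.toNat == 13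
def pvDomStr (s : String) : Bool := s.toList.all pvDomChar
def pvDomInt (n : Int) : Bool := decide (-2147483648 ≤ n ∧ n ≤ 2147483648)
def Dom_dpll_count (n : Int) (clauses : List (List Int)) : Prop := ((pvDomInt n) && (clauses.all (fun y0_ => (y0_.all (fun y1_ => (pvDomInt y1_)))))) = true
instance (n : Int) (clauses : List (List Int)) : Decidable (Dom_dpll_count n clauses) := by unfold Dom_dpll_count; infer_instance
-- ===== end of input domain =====

-- B changes the search driver only: an explicit-stack iterative DFS replaces the recursive solve; same node count.

-- ===== PORT A =====
-- Helpers shared by both ports: the Python `propagate` is textually identical in A and in B.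
-- inner `for lit in clause` loop: builds `unset`, breaks with sat=True on a satisfied literal
def scanClause (assign : PySem.Dict Int Bool) : List Int → List Int → List Int × Bool
  | unset, [] => (unset, false)
  | unset, lit :: rest =>
      let v : Int := |lit| - 1
      match assign.get? v with
      | some b =>
          if (decide (lit > 0) && b) || (decide (lit < 0) && !b) then (unset, true)
          else scanClause assign unset rest
      | none => scanClause assign (unset ++ [lit]) rest

-- one `for clause in clauses` pass of propagate; none = `return False`
def passClauses : List (List Int) → PySem.Dict Int Bool → Bool → Option (PySem.Dict Int Bool × Bool)
  | [], a, ch => some (a, ch)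
  | c :: cs, a, ch =>
      match scanClause a [] c with
      | (_, true) => passClauses cs a ch
      | ([], false) => none
      | ([u], false) => passClauses cs (a.insert (|u| - 1) (decide (u > 0))) true
      | (_, false) => passClauses cs a ch

-- the `while changed` loop, fueled; each productive pass inserts a key |lit|-1 not present before,
-- so clauses.flatten.length + 1 passes always suffice (fuel 0 is never reached)
def propLoop (clauses : List (List Int)) : Nat → PySem.Dict Int Bool → Option (PySem.Dict Int Bool)
  | 0, a => some a
  | f + 1, a =>
      match passClauses clauses a false with
      | none => none
      | some (a', ch) => if ch then propLoop clauses f a' else some a'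

def propagate (clauses : List (List Int)) (a : PySem.Dict Int Bool) : Option (PySem.Dict Int Bool) :=
  propLoop clauses (clauses.flatten.length + 1) a

-- `[i for i in range(n) if i not in assignment]`
def unsetList (n : Int) (a : PySem.Dict Int Bool) : List Int :=
  (PySem.List.pyRange 0 n 1).filter (fun i => !(a.contains i))

-- A's recursive `solve`, returning (result, nodes explored in this call); fueled by recursion depth:
-- every recursive call fixes one more variable of range(n), so depth ≤ n, and fuel n.toNat+1 is never exhausted
def solveA (clauses : List (List Int)) (n : Int) : Nat → PySem.Dict Int Bool → Option (PySem.Dict Int Bool) × Int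
  | 0, _ => (none, 0)
  | f + 1, assign =>
      match propagate clauses assign with
      | none => (none, 1)
      | some a =>
          match unsetList n a with
          | [] => (some a, 1)
          | v :: _ =>
              let r1 := solveA clauses n f (a.insert v true)
              match r1.1 with
              | some r => (some r, 1 + r1.2)
              | none =>
                  let r2 := solveA clauses n f (a.insert v false)
                  (r2.1, 1 + r1.2 + r2.2)

def dpll_count (n : Int) (clauses : List (List Int)) : Int :=
  (solveA clauses n (n.toNat + 1) PySem.Dict.empty).2

-- ===== PORT B =====
-- B's `while stack` loop; head of the list is the top of the stack; fueled by the number of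
-- iterations, which equals the number of nodes explored, at most 2^(n+1) (fuel is never exhausted)
def loopB (clauses : List (List Int)) (n : Int) : Nat → List (PySem.Dict Int Bool) → Int → Int
  | 0, _, acc => acc
  | _ + 1, [], acc => acc
  | f + 1, a :: rest, acc =>
      let acc' := acc + 1
      match propagate clauses a with
      | none => loopB clauses n f rest acc'
      | some a' =>
          match unsetList n a' with
          | [] => acc'
          | v :: _ => loopB clauses n f (a'.insert v true :: a'.insert v false :: rest) acc'

def dpll_count_alt (n : Int) (clauses : List (List Int)) : Int :=
  loopB clauses n (2 ^ (n.toNat + 1)) [PySem.Dict.empty] 0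

-- ===== PRECONDITION & SPEC =====
def Spec_dpll_count (n : Int) (clauses : List (List Int)) (out : Int) : Prop := out = dpll_count_alt n clauses
instance (n : Int) (clauses : List (List Int)) (out : Int) : Decidable (Spec_dpll_count n clauses out) := by unfold Spec_dpll_count; infer_instance

-- ===== CLAIM (what is proved, stated in full; the proofs are below) =====
def Claim_equal_dpll_count : Prop := ∀ (n : Int) (clauses : List (List Int)), Dom_dpll_count n clauses → Spec_dpll_count n clauses (dpll_count n clauses)

-- ===== LEMMAS AND PROOFS =====

theorem loopB_nil (clauses : List (List Int)) (n : Int) (f : Nat) (acc : Int) :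
    loopB clauses n f [] acc = acc := by
  cases f <;> rfl

theorem pass_mono (k : Int) : ∀ (cs : List (List Int)) (a : PySem.Dict Int Bool) (ch : Bool)
    (a' : PySem.Dict Int Bool) (ch' : Bool), passClauses cs a ch = some (a', ch') →
    a.contains k = true → a'.contains k = true := by
  intro cs
  induction cs with
  | nil =>
      intro a ch a' ch' h hk
      simp [passClauses] at h
      rw [← h.1]; exact hk
  | cons c cs ih =>
      intro a ch a' ch' h hk
      unfold passClauses at h
      rcases hs : scanClause a [] c with ⟨unset, sat⟩
      rw [hs] at h
      cases sat with
      | true => exact ih a ch a' ch' h hk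
      | false =>
          match unset, h with
          | [], h => exact absurd h (by simp)
          | [u], h =>
              refine ih _ _ a' ch' h ?_
              simp [PySem.Dict.contains_insert, hk]
          | u1 :: u2 :: us, h => exact ih a ch a' ch' h hk

theorem prop_mono (clauses : List (List Int)) : ∀ (f : Nat) (a a' : PySem.Dict Int Bool),
    propLoop clauses f a = some a' → ∀ k, a.contains k = true → a'.contains k = true := by
  intro f
  induction f with
  | zero =>
      intro a a' h k hk
      simp [propLoop] at h; rw [← h]; exact hk
  | succ f ih =>
      intro a a' h k hk
      unfold propLoop at h
      rcases hp : passClauses clauses a false with _ | ⟨a1, ch⟩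
      · rw [hp] at h; exact absurd h (by simp)
      · rw [hp] at h
        have h1 := pass_mono k clauses a false a1 ch hp hk
        cases ch with
        | true => exact ih a1 a' h k h1
        | false => simp at h; rw [← h]; exact h1

theorem unset_len_le (n : Int) (a a' : PySem.Dict Int Bool)
    (h : ∀ k, a.contains k = true → a'.contains k = true) :
    (unsetList n a').length ≤ (unsetList n a).length := by
  unfold unsetList
  refine (List.monotone_filter_right _ ?_).length_le
  intro x hx
  have hca : a.contains x = false := by
    cases hc : a.contains x
    · rfl
    · have := h x hc; simp [this] at hx
  simp [hca]

theorem unset_insert (n : Int) (a : PySem.Dict Int Bool) (v : Int) (b : Bool)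
    (rest : List Int) (hu : unsetList n a = v :: rest) :
    unsetList n (a.insert v b) = rest := by
  have hnd : (unsetList n a).Nodup := (PySem.List.nodup_pyRange_one 0 n).filter _
  rw [hu] at hnd
  have hvr : v ∉ rest := (List.nodup_cons.mp hnd).1
  have hstep : unsetList n (a.insert v b) = (unsetList n a).filter (fun i => !(i == v)) := by
    unfold unsetList
    rw [List.filter_filter]
    refine List.filter_congr ?_
    intro x _
    cases h1 : (x == v) <;> cases h2 : a.contains x <;>
      simp [PySem.Dict.contains_insert, h1, h2]
  rw [hstep, hu]
  rw [List.filter_cons_of_neg (by simp)]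
  refine List.filter_eq_self.mpr ?_
  intro x hx
  simp
  intro hxv
  rw [hxv] at hx
  exact hvr hx

theorem solveA_succ (clauses : List (List Int)) (n : Int) (g : Nat) (assign : PySem.Dict Int Bool) :
    solveA clauses n (g+1) assign =
      match propagate clauses assign with
      | none => (none, 1)
      | some a =>
          match unsetList n a with
          | [] => (some a, 1)
          | v :: _ =>
              let r1 := solveA clauses n g (a.insert v true)
              match r1.1 with
              | some r => (some r, 1 + r1.2)
              | none =>
                  let r2 := solveA clauses n g (a.insert v false)
                  (r2.1, 1 + r1.2 + r2.2) := rfl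

theorem loopB_succ (clauses : List (List Int)) (n : Int) (f : Nat) (a : PySem.Dict Int Bool)
    (rest : List (PySem.Dict Int Bool)) (acc : Int) :
    loopB clauses n (f+1) (a :: rest) acc =
      match propagate clauses a with
      | none => loopB clauses n f rest (acc + 1)
      | some a' =>
          match unsetList n a' with
          | [] => acc + 1
          | v :: _ => loopB clauses n f (a'.insert v true :: a'.insert v false :: rest) (acc + 1) := rfl

theorem solve_count_bound (clauses : List (List Int)) (n : Int) :
    ∀ (g : Nat) (a : PySem.Dict Int Bool),
      0 ≤ (solveA clauses n g a).2 ∧ (solveA clauses n g a).2 ≤ 2 ^ g - 1 := by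
  intro g
  induction g with
  | zero => intro a; simp [solveA]
  | succ g ih =>
      intro a
      have h2g : (1:Int) ≤ 2 ^ g := one_le_pow₀ (by norm_num)
      have hps : (2:Int) ^ (g+1) = 2 ^ g * 2 := pow_succ 2 g
      rw [solveA_succ]
      rcases hp : propagate clauses a with _ | a'
      · dsimp only
        constructor <;> linarith
      · dsimp only
        rcases hu : unsetList n a' with _ | ⟨v, t⟩
        · dsimp only
          constructor <;> linarith
        · dsimp only
          obtain ⟨h10, h11⟩ := ih (a'.insert v true)
          obtain ⟨h20, h21⟩ := ih (a'.insert v false)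
          rcases hr : (solveA clauses n g (a'.insert v true)).1 with _ | r <;> dsimp only <;>
            constructor <;> linarith

theorem loop_sim (clauses : List (List Int)) (n : Int) :
    ∀ (g : Nat) (a : PySem.Dict Int Bool) (rest : List (PySem.Dict Int Bool)) (acc : Int) (f : Nat),
      (unsetList n a).length < g →
      loopB clauses n ((solveA clauses n g a).2.toNat + f) (a :: rest) acc =
        match (solveA clauses n g a).1 with
        | some _ => acc + (solveA clauses n g a).2
        | none => loopB clauses n f rest (acc + (solveA clauses n g a).2) := by
  intro g
  induction g with
  | zero => intro a rest acc f h; exact absurd h (by omega)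
  | succ g ih =>
      intro a rest acc f h
      rcases hp : propagate clauses a with _ | a'
      · -- conflict node: A counts 1, B pops it and moves on
        have hs : solveA clauses n (g+1) a = (none, 1) := by rw [solveA_succ, hp]
        rw [hs]
        dsimp only
        have hf : ((1:Int).toNat + f) = f + 1 := by omega
        rw [hf, loopB_succ, hp]
      · rcases hu : unsetList n a' with _ | ⟨v, t⟩
        · -- complete assignment: both stop here
          have hs : solveA clauses n (g+1) a = (some a', 1) := by
            rw [solveA_succ, hp]; dsimp only; rw [hu]
          rw [hs]
          dsimp only
          have hf : ((1:Int).toNat + f) = f + 1 := by omega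
          rw [hf, loopB_succ, hp]
          dsimp only
          rw [hu]
        · -- branching node
          have hmono : ∀ k, a.contains k = true → a'.contains k = true := by
            intro k hk
            unfold propagate at hp
            exact prop_mono clauses _ a a' hp k hk
          have hlen' : (unsetList n a').length ≤ (unsetList n a).length := unset_len_le n a a' hmono
          have hlt : (unsetList n a').length = t.length + 1 := by rw [hu]; simp
          have hT : (unsetList n (a'.insert v true)).length < g := by
            rw [unset_insert n a' v true t hu]; omega
          have hF : (unsetList n (a'.insert v false)).length < g := by
            rw [unset_insert n a' v false t hu]; omega
          obtain ⟨hc1, -⟩ := solve_count_bound clauses n g (a'.insert v true)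
          obtain ⟨hc2, -⟩ := solve_count_bound clauses n g (a'.insert v false)
          rcases hr1 : (solveA clauses n g (a'.insert v true)).1 with _ | r
          · -- True child fails; the False child is explored next
            have hs : solveA clauses n (g+1) a =
                ((solveA clauses n g (a'.insert v false)).1,
                 1 + (solveA clauses n g (a'.insert v true)).2 + (solveA clauses n g (a'.insert v false)).2) := by
              rw [solveA_succ, hp]; dsimp only; rw [hu]; dsimp only; rw [hr1]
            rw [hs]
            dsimp only
            have hfuel : ((1 + (solveA clauses n g (a'.insert v true)).2 + (solveA clauses n g (a'.insert v false)).2).toNat + f)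
                = ((solveA clauses n g (a'.insert v true)).2.toNat + ((solveA clauses n g (a'.insert v false)).2.toNat + f)) + 1 := by
              omega
            rw [hfuel, loopB_succ, hp]
            dsimp only
            rw [hu]
            dsimp only
            have h1 := ih (a'.insert v true) (a'.insert v false :: rest) (acc + 1)
              ((solveA clauses n g (a'.insert v false)).2.toNat + f) hT
            rw [hr1] at h1
            dsimp only at h1
            rw [h1]
            have h2 := ih (a'.insert v false) rest (acc + 1 + (solveA clauses n g (a'.insert v true)).2) f hF
            rw [h2]
            rcases hr2 : (solveA clauses n g (a'.insert v false)).1 with _ | r2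
            · dsimp only
              congr 1
              ring
            · dsimp only
              ring
          · -- True child succeeds: search stops inside it
            have hs : solveA clauses n (g+1) a =
                (some r, 1 + (solveA clauses n g (a'.insert v true)).2) := by
              rw [solveA_succ, hp]; dsimp only; rw [hu]; dsimp only; rw [hr1]
            rw [hs]
            dsimp only
            have hfuel : ((1 + (solveA clauses n g (a'.insert v true)).2).toNat + f)
                = ((solveA clauses n g (a'.insert v true)).2.toNat + f) + 1 := by omega
            rw [hfuel, loopB_succ, hp]
            dsimp only
            rw [hu]
            dsimp only
            have h1 := ih (a'.insert v true) (a'.insert v false :: rest) (acc + 1) f hT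
            rw [hr1] at h1
            dsimp only at h1
            rw [h1]
            ring

-- ===== VERDICT (by name: the statement is the Claim_ definition above) =====
theorem dpll_count_spec : Claim_equal_dpll_count := by
  unfold Claim_equal_dpll_count
  intro n clauses _
  unfold Spec_dpll_count dpll_count dpll_count_alt
  have hlen : (unsetList n PySem.Dict.empty).length < n.toNat + 1 := by
    unfold unsetList
    have h1 := List.length_filter_le (fun i : Int => !((PySem.Dict.empty : PySem.Dict Int Bool).contains i)) (PySem.List.pyRange 0 n 1)
    have h2 : (PySem.List.pyRange 0 n 1).length = (n - 0).toNat := PySem.List.length_pyRange_one 0 n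
    omega
  obtain ⟨hc0, hc1⟩ := solve_count_bound clauses n (n.toNat + 1) PySem.Dict.empty
  have hcast : ((2:Int) ^ (n.toNat + 1)) = ((2 ^ (n.toNat + 1) : Nat) : Int) := by push_cast; ring
  rw [hcast] at hc1
  have hcle : (solveA clauses n (n.toNat + 1) PySem.Dict.empty).2.toNat ≤ 2 ^ (n.toNat + 1) := by omega
  obtain ⟨f, hf⟩ : ∃ f, 2 ^ (n.toNat + 1) = (solveA clauses n (n.toNat + 1) PySem.Dict.empty).2.toNat + f :=
    ⟨_, (Nat.add_sub_cancel' hcle).symm⟩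
  rw [hf, loop_sim clauses n (n.toNat + 1) PySem.Dict.empty [] 0 f hlen]
  rcases hr : (solveA clauses n (n.toNat + 1) PySem.Dict.empty).1 with _ | r
  · dsimp only; rw [loopB_nil]; ring
  · dsimp only; ring
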